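-- pv_equiv track=rewrite | github.com/Xuyuanp/leetcode-2021 | 1155.number-of-dice-rolls-with-target-sum.py | numRollsToTarget1
-- ===== SOURCE A (Python) =====
-- from collections import defaultdict
--
-- def numRollsToTarget1(d: int, f: int, target: int) -> int:
--     if not (d <= target <= d * f):
--         return 0
--     dp = defaultdict(int)
--     dp[0] = 1
--     for _ in range(d):
--         next_dp = defaultdict(int)
--         for i, cnt in dp.items():
--             for x in range(1, f + 1):
--                 next_dp[i + x] += cnt
--         dp = next_dp
--     return dp[target] % (10**9 + 7)
-- ===== SOURCE B (Python) =====
-- def numRollsToTarget1(d: int, f: int, target: int) -> int: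
--     if not (d <= target <= d * f):
--         return 0
--     if d <= 0:
--         # no dice: only the empty roll, which sums to 0
--         return 1 if target == 0 else 0
--     dp = [0] * (target + 1)
--     dp[0] = 1
--     for _ in range(d):
--         pref = [0]
--         run = 0
--         for v in dp:
--             run += v
--             pref.append(run)
--         ndp = [0]
--         for s in range(1, target + 1):
--             ndp.append(pref[s] - pref[max(0, s - f)])
--         dp = ndp
--     return dp[target] % (10**9 + 7)
-- ===== Notes on version B (the rewrite author's own statement) =====
-- stated objective: alternative
-- what changed: Replaces the defaultdict convolution that loops over all f faces for every reachable-sum key with a fixed-size array DP whose transition is a prefix-sum sliding window (O(target) per round instead of O(#keys*f)); measured speed on a timing run's random inputs was inconclusive because giant-integer arithmetic dominates both.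
import Mathlib
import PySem

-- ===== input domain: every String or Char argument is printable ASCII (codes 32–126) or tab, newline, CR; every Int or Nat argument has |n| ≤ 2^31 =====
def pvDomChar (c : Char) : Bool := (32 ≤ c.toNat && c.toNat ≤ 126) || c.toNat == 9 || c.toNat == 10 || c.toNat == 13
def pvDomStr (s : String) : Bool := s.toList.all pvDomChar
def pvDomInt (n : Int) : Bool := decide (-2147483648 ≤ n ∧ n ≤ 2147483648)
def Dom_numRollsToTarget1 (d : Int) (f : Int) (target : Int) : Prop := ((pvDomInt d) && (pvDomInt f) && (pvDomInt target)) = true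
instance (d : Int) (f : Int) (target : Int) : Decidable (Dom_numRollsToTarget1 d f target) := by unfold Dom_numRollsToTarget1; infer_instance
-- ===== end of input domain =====

-- B replaces A's defaultdict convolution (inner loop over all f faces per key) by a
-- fixed-size array DP with a prefix-sum sliding-window transition (objective: alternative).

-- ===== PORT A =====
-- inner 'for x in range(1, f + 1): next_dp[i + x] += cnt'
def pvAInner (f : Int) (c : Int) (i : Int) (nd : PySem.Dict Int Int) : PySem.Dict Int Int :=
  (PySem.List.pyRange 1 (f + 1) 1).foldl (fun nd x => nd.modify (i + x) 0 (· + c)) nd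

-- one round: 'next_dp = defaultdict(int); for i, cnt in dp.items(): …'
def pvAStep (f : Int) (dp : PySem.Dict Int Int) : PySem.Dict Int Int :=
  dp.items.foldl (fun acc ic => pvAInner f ic.2 ic.1 acc) PySem.Dict.empty

def numRollsToTarget1 (d : Int) (f : Int) (target : Int) : Int :=
  if ¬(d ≤ target ∧ target ≤ d * f) then 0
  else
    let dp0 : PySem.Dict Int Int := PySem.Dict.empty.insert 0 1   -- dp = defaultdict(int); dp[0] = 1
    let dp := (PySem.List.pyRange 0 d 1).foldl (fun dp _ => pvAStep f dp) dp0
    PySem.Int.mod (dp.getD target 0) 1000000007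

-- ===== PORT B =====
-- one round of Source B: prefix sums of dp, then ndp[s] = pref[s] - pref[max(0, s-f)]
def pvBStep (f : Int) (target : Int) (dp : List Int) : List Int :=
  -- 'pref = [0]; run = 0; for v in dp: run += v; pref.append(run)'
  let pr := dp.foldl (fun (acc : List Int × Int) v => (acc.1 ++ [acc.2 + v], acc.2 + v)) ([0], 0)
  -- 'ndp = [0]; for s in range(1, target+1): ndp.append(pref[s] - pref[max(0, s-f)])'
  -- pref[s] / pref[max(0,s-f)]: indices are in [0, len pref), so pyGetD is exact here
  (PySem.List.pyRange 1 (target + 1) 1).foldl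
    (fun ndp s => ndp ++ [PySem.List.pyGetD pr.1 s 0 - PySem.List.pyGetD pr.1 (max 0 (s - f)) 0]) [0]

def numRollsToTarget1_alt (d : Int) (f : Int) (target : Int) : Int :=
  if ¬(d ≤ target ∧ target ≤ d * f) then 0
  else if d ≤ 0 then (if target = 0 then 1 else 0)   -- no dice: only the empty roll, summing to 0
  else
    let dp0 : List Int := (List.replicate (target + 1).toNat 0).set 0 1   -- dp = [0]*(target+1); dp[0] = 1
    let dp := (PySem.List.pyRange 0 d 1).foldl (fun dp _ => pvBStep f target dp) dp0
    -- dp[target]: in range here (0 ≤ target < len dp), so pyGetD is exact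
    PySem.Int.mod (PySem.List.pyGetD dp target 0) 1000000007

-- ===== PRECONDITION & SPEC =====
def Spec_numRollsToTarget1 (d : Int) (f : Int) (target : Int) (out : Int) : Prop := out = numRollsToTarget1_alt d f target
instance (d : Int) (f : Int) (target : Int) (out : Int) : Decidable (Spec_numRollsToTarget1 d f target out) := by unfold Spec_numRollsToTarget1; infer_instance

-- ===== CLAIM (what is proved, stated in full; the proofs are below) =====
def Claim_equal_numRollsToTarget1 : Prop := ∀ (d : Int) (f : Int) (target : Int), Dom_numRollsToTarget1 d f target → Spec_numRollsToTarget1 d f target (numRollsToTarget1 d f target)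

-- ===== LEMMAS AND PROOFS =====

-- the mathematical value both DPs compute: number of ways k dice with faces 1..f sum to s
def pvWays (f : Int) : Nat → Int → Int
  | 0, s => if s = 0 then 1 else 0
  | k + 1, s => ((PySem.List.pyRange 1 (f + 1) 1).map (fun x => pvWays f k (s - x))).sum

-- a loop whose body ignores the loop variable is an iterate
theorem pvFoldl_ignore_iterate {α : Type} (g : α → α) (l : List Int) (init : α) :
    l.foldl (fun s _ => g s) init = g^[l.length] init := by
  induction l generalizing init with
  | nil => rfl
  | cons x t ih => simp [List.foldl_cons, ih, Function.iterate_succ_apply]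

theorem pvWays_eq_zero (f : Int) : ∀ (k : Nat) (s : Int), (s < (k : Int) ∨ (k : Int) * f < s) → pvWays f k s = 0 := by
  intro k
  induction k with
  | zero =>
    intro s h
    have hs : s ≠ 0 := by push_cast at h; omega
    simp [pvWays, hs]
  | succ k ih =>
    intro s h
    show ((PySem.List.pyRange 1 (f + 1) 1).map (fun x => pvWays f k (s - x))).sum = 0
    apply List.sum_eq_zero
    intro y hy
    obtain ⟨x, hx, rfl⟩ := List.mem_map.mp hy
    rw [PySem.List.mem_pyRange_one] at hx
    apply ih
    rcases h with h | h
    · left; push_cast at h; omega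
    · right; push_cast at h; nlinarith [hx.1, hx.2]

-- Σ over a range with zero terms outside a subrange
theorem pvSum_extend (g : Int → Int) (L a b R : Int) (h1 : L ≤ a) (h2 : a ≤ b) (h3 : b ≤ R)
    (hz : ∀ i, (L ≤ i ∧ i < a) ∨ (b ≤ i ∧ i < R) → g i = 0) :
    ((PySem.List.pyRange L R 1).map g).sum = ((PySem.List.pyRange a b 1).map g).sum := by
  rw [PySem.List.pyRange_one_append L a R h1 (le_trans h2 h3),
      PySem.List.pyRange_one_append a b R h2 h3]
  simp only [List.map_append, List.sum_append]
  have hz1 : ((PySem.List.pyRange L a 1).map g).sum = 0 := by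
    apply List.sum_eq_zero
    intro y hy
    obtain ⟨i, hi, rfl⟩ := List.mem_map.mp hy
    rw [PySem.List.mem_pyRange_one] at hi
    exact hz i (Or.inl hi)
  have hz2 : ((PySem.List.pyRange b R 1).map g).sum = 0 := by
    apply List.sum_eq_zero
    intro y hy
    obtain ⟨i, hi, rfl⟩ := List.mem_map.mp hy
    rw [PySem.List.mem_pyRange_one] at hi
    exact hz i (Or.inr hi)
  rw [hz1, hz2]; ring

-- reflecting a sum over List.range
theorem pvSum_range_reflect (g : Nat → Int) : ∀ (n : Nat),
    ((List.range n).map (fun m => g (n - 1 - m))).sum = ((List.range n).map g).sum := by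
  intro n
  induction n with
  | zero => rfl
  | succ n ih =>
    conv_lhs => rw [List.range_succ_eq_map]
    rw [List.range_succ]
    simp only [List.map_cons, List.map_map, List.sum_cons, List.map_append, List.sum_append,
      List.map_nil, List.sum_nil, Function.comp_def]
    have h1 : (fun m => g (n + 1 - 1 - (m + 1))) = fun m => g (n - 1 - m) := by
      funext m; congr 1; omega
    have h2 : n + 1 - 1 - 0 = n := by omega
    rw [h1, h2, ih]
    ring

-- reindexing: Σ_{x=1..f} h (j - x) = Σ_{i=j-f..j-1} h i
theorem pvSum_reindex (h : Int → Int) (f j : Int) (hf : 0 ≤ f) :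
    ((PySem.List.pyRange 1 (f + 1) 1).map (fun x => h (j - x))).sum
      = ((PySem.List.pyRange (j - f) j 1).map h).sum := by
  rw [PySem.List.pyRange_one 1 (f + 1), PySem.List.pyRange_one (j - f) j]
  simp only [List.map_map, Function.comp_def]
  have hn1 : (f + 1 - 1).toNat = f.toNat := by omega
  have hn2 : (j - (j - f)).toNat = f.toNat := by omega
  rw [hn1, hn2]
  calc ((List.range f.toNat).map (fun (m : Nat) => h (j - (1 + (m : Int))))).sum
      = ((List.range f.toNat).map (fun (m : Nat) => h (j - f + ((f.toNat - 1 - m : Nat) : Int)))).sum := by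
        apply congrArg
        apply List.map_congr_left
        intro m hm
        rw [List.mem_range] at hm
        congr 1
        have : ((f.toNat - 1 - m : Nat) : Int) = f - 1 - m := by omega
        rw [this]; ring
    _ = ((List.range f.toNat).map (fun (m : Nat) => h (j - f + (m : Int)))).sum :=
        pvSum_range_reflect (fun m => h (j - f + (m : Int))) f.toNat

-- the shared transition identity
theorem pvWays_succ_window (f : Int) (k : Nat) (j : Int) (hf : 1 ≤ f) :
    pvWays f (k + 1) j
      = ((PySem.List.pyRange ((k : Int)) ((k : Int) * f + 1) 1).map
          (fun i => if 1 ≤ j - i ∧ j - i ≤ f then pvWays f k i else 0)).sum := by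
  have hk0 : (0 : Int) ≤ (k : Int) := Int.natCast_nonneg k
  have hkf : (k : Int) ≤ (k : Int) * f := le_mul_of_one_le_right hk0 hf
  set g : Int → Int := fun i => if 1 ≤ j - i ∧ j - i ≤ f then pvWays f k i else 0 with hg
  have h1 : pvWays f (k + 1) j = ((PySem.List.pyRange (j - f) j 1).map (fun i => pvWays f k i)).sum := by
    show ((PySem.List.pyRange 1 (f + 1) 1).map (fun x => pvWays f k (j - x))).sum = _
    exact pvSum_reindex (fun i => pvWays f k i) f j (by omega)
  have h2 : ((PySem.List.pyRange (j - f) j 1).map (fun i => pvWays f k i)).sum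
      = ((PySem.List.pyRange (j - f) j 1).map g).sum := by
    apply congrArg
    apply List.map_congr_left
    intro i hi
    rw [PySem.List.mem_pyRange_one] at hi
    rw [hg]; simp only []
    rw [if_pos (by omega)]
  set L : Int := min ((k : Int)) (j - f) with hL
  set R : Int := max ((k : Int) * f + 1) j with hR
  have h3 : ((PySem.List.pyRange (j - f) j 1).map g).sum = ((PySem.List.pyRange L R 1).map g).sum := by
    symm
    apply pvSum_extend g L (j - f) j R (by omega) (by omega) (by omega)
    intro i hi
    rw [hg]; simp only []
    rw [if_neg (by omega)]
  have h4 : ((PySem.List.pyRange ((k : Int)) ((k : Int) * f + 1) 1).map g).sum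
      = ((PySem.List.pyRange L R 1).map g).sum := by
    symm
    apply pvSum_extend g L ((k : Int)) ((k : Int) * f + 1) R (by omega) (by omega) (by omega)
    intro i hi
    rw [hg]; simp only []
    split_ifs with hc
    · exact pvWays_eq_zero f k i (by omega)
    · rfl
  rw [h1, h2, h3, ← h4]

-- ---- A side ----

theorem pvAInner_getD (f c i : Int) (nd : PySem.Dict Int Int) (j : Int) :
    (pvAInner f c i nd).getD j 0 = nd.getD j 0 + (if 1 ≤ j - i ∧ j - i ≤ f then c else 0) := by
  have key : ∀ (xs : List Int) (nd : PySem.Dict Int Int),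
      (xs.foldl (fun nd x => nd.modify (i + x) 0 (· + c)) nd).getD j 0
        = nd.getD j 0 + (xs.count (j - i) : Int) * c := by
    intro xs
    induction xs with
    | nil => intro nd; simp
    | cons x t ih =>
      intro nd
      rw [List.foldl_cons, ih, PySem.Dict.getD_modify, List.count_cons]
      simp only [beq_iff_eq]
      by_cases hx : j = i + x
      · rw [if_pos hx, if_pos (by omega : x = j - i)]
        subst hx; push_cast; ring
      · rw [if_neg hx, if_neg (by omega : ¬(x = j - i))]
        push_cast; ring
  rw [pvAInner, key]
  by_cases hm : (j - i) ∈ PySem.List.pyRange 1 (f + 1) 1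
  · rw [List.count_eq_one_of_mem (PySem.List.nodup_pyRange_one 1 (f + 1)) hm]
    rw [PySem.List.mem_pyRange_one] at hm
    rw [if_pos (by omega)]; ring
  · rw [List.count_eq_zero_of_not_mem hm]
    rw [PySem.List.mem_pyRange_one] at hm
    rw [if_neg (by omega)]; ring

theorem pvAInner_mem_keys (f c i : Int) (nd : PySem.Dict Int Int) (j : Int) :
    j ∈ (pvAInner f c i nd).keys ↔ j ∈ nd.keys ∨ (1 ≤ j - i ∧ j - i ≤ f) := by
  rw [pvAInner,
    PySem.Dict.keys_foldl_modify_key (key := fun x => i + x) (f := fun _ _ => (· + c)),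
    PySem.Set.mem_update]
  constructor
  · rintro (h | h)
    · exact Or.inl h
    · obtain ⟨x, hx, rfl⟩ := List.mem_map.mp h
      rw [PySem.List.mem_pyRange_one] at hx
      exact Or.inr (by omega)
  · rintro (h | h)
    · exact Or.inl h
    · refine Or.inr (List.mem_map.mpr ⟨j - i, ?_, by ring⟩)
      rw [PySem.List.mem_pyRange_one]; omega

theorem pvAInner_nodup (f c i : Int) (nd : PySem.Dict Int Int) (h : nd.keys.Nodup) :
    (pvAInner f c i nd).keys.Nodup := by
  exact PySem.Dict.nodup_keys_foldl_modify_key _ (fun x => i + x) 0 (fun _ _ => (· + c)) nd h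

theorem pvAFold_getD (f : Int) (ps : List (Int × Int)) (nd : PySem.Dict Int Int) (j : Int) :
    (ps.foldl (fun acc ic => pvAInner f ic.2 ic.1 acc) nd).getD j 0
      = nd.getD j 0 + (ps.map (fun ic => if 1 ≤ j - ic.1 ∧ j - ic.1 ≤ f then ic.2 else 0)).sum := by
  induction ps generalizing nd with
  | nil => simp
  | cons p t ih =>
    rw [List.foldl_cons, ih, pvAInner_getD]
    simp only [List.map_cons, List.sum_cons]
    ring

theorem pvAFold_mem_keys (f : Int) (ps : List (Int × Int)) (nd : PySem.Dict Int Int) (j : Int) :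
    j ∈ (ps.foldl (fun acc ic => pvAInner f ic.2 ic.1 acc) nd).keys
      ↔ j ∈ nd.keys ∨ ∃ ic ∈ ps, 1 ≤ j - ic.1 ∧ j - ic.1 ≤ f := by
  induction ps generalizing nd with
  | nil => simp
  | cons p t ih =>
    rw [List.foldl_cons, ih, pvAInner_mem_keys]
    simp only [List.mem_cons]
    constructor
    · rintro ((h | h) | ⟨ic, hic, hc⟩)
      · exact Or.inl h
      · exact Or.inr ⟨p, Or.inl rfl, h⟩
      · exact Or.inr ⟨ic, Or.inr hic, hc⟩
    · rintro (h | ⟨ic, (rfl | hic), hc⟩)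
      · exact Or.inl (Or.inl h)
      · exact Or.inl (Or.inr hc)
      · exact Or.inr ⟨ic, hic, hc⟩

theorem pvAFold_nodup (f : Int) (ps : List (Int × Int)) (nd : PySem.Dict Int Int) (h : nd.keys.Nodup) :
    (ps.foldl (fun acc ic => pvAInner f ic.2 ic.1 acc) nd).keys.Nodup := by
  induction ps generalizing nd with
  | nil => exact h
  | cons p t ih => exact ih _ (pvAInner_nodup f p.2 p.1 nd h)

-- sum over the items of a dict = sum over any nodup list with the same membership as its keys
theorem pvItems_sum (dp : PySem.Dict Int Int) (w : Int → Int) (P : Int → Prop) [DecidablePred P]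
    (ks : List Int) (hnd : dp.keys.Nodup) (hks : ks.Nodup)
    (hmem : ∀ i, i ∈ ks ↔ i ∈ dp.keys) (hval : ∀ i, dp.getD i 0 = w i) :
    (dp.items.map (fun ic => if P ic.1 then ic.2 else 0)).sum
      = (ks.map (fun i => if P i then w i else 0)).sum := by
  have h1 : (dp.items.map (fun ic => if P ic.1 then ic.2 else 0)).sum
      = (dp.keys.map (fun i => if P i then w i else 0)).sum := by
    have : dp.items.map (fun ic => if P ic.1 then ic.2 else 0)
        = dp.items.map (fun ic => (fun i => if P i then w i else 0) ic.1) := by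
      apply List.map_congr_left
      intro ic hic
      obtain ⟨a, b⟩ := ic
      have hv : dp.getD a 0 = b := PySem.Dict.getD_of_mem_items dp hic hnd 0
      simp only []
      rw [← hv, hval]
    rw [this]
    have hk : dp.keys = dp.items.map Prod.fst := rfl
    rw [hk, List.map_map]
    rfl
  rw [h1]
  have hperm : ks.Perm dp.keys := (List.perm_ext_iff_of_nodup hks hnd).mpr hmem
  exact (List.Perm.sum_eq (hperm.map _)).symm

def pvAInv (f : Int) (k : Nat) (dp : PySem.Dict Int Int) : Prop :=
  dp.keys.Nodup ∧ (∀ i, dp.getD i 0 = pvWays f k i) ∧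
    (∀ i, i ∈ dp.keys ↔ ((k : Int) ≤ i ∧ i ≤ (k : Int) * f))

theorem pvAInv_zero (f : Int) : pvAInv f 0 (PySem.Dict.empty.insert 0 1) := by
  refine ⟨?_, ?_, ?_⟩
  · exact PySem.Dict.nodup_keys_insert PySem.Dict.empty 0 1 PySem.Dict.nodup_keys_empty
  · intro i
    rw [PySem.Dict.getD_insert]
    show _ = pvWays f 0 i
    by_cases hi : i = 0
    · rw [if_pos hi]; simp [pvWays, hi]
    · rw [if_neg hi]; simp [pvWays, hi, PySem.Dict.getD_empty]
  · intro i
    rw [PySem.Dict.mem_keys_insert]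
    simp only [PySem.Dict.keys_empty, List.not_mem_nil, or_false, Nat.cast_zero, zero_mul]
    omega

theorem pvAInv_step (f : Int) (hf : 1 ≤ f) (k : Nat) (dp : PySem.Dict Int Int)
    (h : pvAInv f k dp) : pvAInv f (k + 1) (pvAStep f dp) := by
  obtain ⟨hnd, hval, hmem⟩ := h
  have hk0 : (0 : Int) ≤ (k : Int) := Int.natCast_nonneg k
  have hkf : (k : Int) ≤ (k : Int) * f := le_mul_of_one_le_right hk0 hf
  refine ⟨?_, ?_, ?_⟩
  · exact pvAFold_nodup f dp.items PySem.Dict.empty PySem.Dict.nodup_keys_empty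
  · intro j
    rw [pvAStep, pvAFold_getD, PySem.Dict.getD_empty]
    rw [pvItems_sum dp (pvWays f k) (fun i => 1 ≤ j - i ∧ j - i ≤ f)
          (PySem.List.pyRange ((k : Int)) ((k : Int) * f + 1) 1)
          hnd (PySem.List.nodup_pyRange_one _ _)
          (fun i => by rw [PySem.List.mem_pyRange_one, hmem i]; omega) hval]
    rw [← pvWays_succ_window f k j hf]
    ring
  · intro j
    rw [pvAStep, pvAFold_mem_keys]
    simp only [PySem.Dict.keys_empty, List.not_mem_nil, false_or]
    constructor
    · rintro ⟨ic, hic, hc⟩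
      have hik : ic.1 ∈ dp.keys := PySem.Dict.mem_keys_of_mem_items dp hic
      rw [hmem ic.1] at hik
      push_cast
      constructor <;> nlinarith [hik.1, hik.2, hc.1, hc.2]
    · intro hj
      push_cast at hj
      have hexp : ((k : Int) + 1) * f = (k : Int) * f + f := by ring
      set i : Int := max ((k : Int)) (j - f) with hi
      have hik : i ∈ dp.keys := by rw [hmem]; constructor <;> omega
      obtain ⟨v, hv⟩ : ∃ v, dp.get? i = some v := by
        rcases hg : dp.get? i with _ | v
        · exact absurd hik (Iff.mp (PySem.Dict.get?_eq_none_iff_not_mem_keys dp i) hg)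
        · exact ⟨v, rfl⟩
      exact ⟨(i, v), PySem.Dict.mem_items_of_get?_eq_some dp hv, by constructor <;> omega⟩

theorem pvAInv_iter (f : Int) (hf : 1 ≤ f) (n : Nat) :
    pvAInv f n ((pvAStep f)^[n] (PySem.Dict.empty.insert 0 1)) := by
  induction n with
  | zero => exact pvAInv_zero f
  | succ n ih => rw [Function.iterate_succ_apply']; exact pvAInv_step f hf n _ ih

-- ---- B side ----

-- partial sums of a list starting from r
def pvPsums (r : Int) : List Int → List Int
  | [] => []
  | v :: t => (r + v) :: pvPsums (r + v) t

theorem pvPref_eq (dp : List Int) : ∀ (p0 : List Int) (r0 : Int),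
    dp.foldl (fun (acc : List Int × Int) v => (acc.1 ++ [acc.2 + v], acc.2 + v)) (p0, r0)
      = (p0 ++ pvPsums r0 dp, r0 + dp.sum) := by
  induction dp with
  | nil => intro p0 r0; simp [pvPsums]
  | cons v t ih =>
    intro p0 r0
    rw [List.foldl_cons, ih]
    simp only [pvPsums, Prod.mk.injEq, List.sum_cons]
    constructor
    · simp [List.append_assoc]
    · ring

theorem pvPsums_length (l : List Int) : ∀ r, (pvPsums r l).length = l.length := by
  induction l with
  | nil => intro r; rfl
  | cons v t ih => intro r; simp [pvPsums, ih]

theorem pvPsums_getElem (l : List Int) : ∀ (r : Int) (m : Nat) (hm : m < l.length),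
    (pvPsums r l)[m]'(by rw [pvPsums_length]; exact hm) = r + (l.take (m + 1)).sum := by
  induction l with
  | nil => intro r m hm; simp at hm
  | cons v t ih =>
    intro r m hm
    cases m with
    | zero => simp [pvPsums]
    | succ m =>
      have hm' : m < t.length := by simpa using hm
      show (pvPsums (r + v) t)[m]'(by rw [pvPsums_length]; exact hm') = _
      rw [ih (r + v) m hm', List.take_succ_cons, List.sum_cons]
      ring

def pvBInv (f target : Int) (k : Nat) (dp : List Int) : Prop :=
  dp = (List.range (target + 1).toNat).map (fun (s : Nat) => pvWays f k (s : Int))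

theorem pvBInv_zero (f target : Int) (_ht : 0 ≤ target) :
    pvBInv f target 0 ((List.replicate (target + 1).toNat 0).set 0 1) := by
  unfold pvBInv
  apply List.ext_getElem
  · simp
  · intro m h1 h2
    rw [List.getElem_map, List.getElem_range, List.getElem_set]
    show _ = pvWays f 0 (m : Int)
    by_cases hm : m = 0
    · subst hm; rw [if_pos rfl]; simp [pvWays]
    · rw [if_neg (by omega), List.getElem_replicate]
      simp [pvWays, hm]

theorem pvBInv_step (f target : Int) (hf : 1 ≤ f) (ht : 0 ≤ target) (k : Nat) (dp : List Int)
    (h : pvBInv f target k dp) : pvBInv f target (k + 1) (pvBStep f target dp) := by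
  have hk0 : (0 : Int) ≤ (k : Int) := Int.natCast_nonneg k
  have ht1 : (target + 1).toNat = target.toNat + 1 := by omega
  unfold pvBInv at h ⊢
  subst h
  set n : Nat := (target + 1).toNat with hn
  set W : Nat → Int := fun (s : Nat) => pvWays f k (s : Int) with hW
  set dp : List Int := (List.range n).map W with hdp
  have hlen : dp.length = n := by rw [hdp]; simp
  -- the prefix-sum list
  set P : List Int := [0] ++ pvPsums 0 dp with hP
  have hPlen : P.length = n + 1 := by rw [hP]; simp [pvPsums_length, hlen]
  -- reading pref[j] is the sum of the first j dp entries, as a pyRange sum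
  have hget : ∀ (j : Nat), j ≤ n →
      PySem.List.pyGetD P (j : Int) 0
        = ((PySem.List.pyRange 0 (j : Int) 1).map (fun i => pvWays f k i)).sum := by
    intro j hj
    rw [PySem.List.pyRange_zero_nat, List.map_map]
    have htake : ((List.range j).map ((fun i => pvWays f k i) ∘ (fun (m : Nat) => (m : Int)))).sum = (dp.take j).sum := by
      have : dp.take j = (List.range j).map W := by
        rw [hdp, ← List.map_take, List.take_range, min_eq_left hj]
      rw [this, hW]
      rfl
    rw [htake]
    rw [PySem.List.pyGetD_eq_getElem P 0 (by omega) (by rw [hPlen]; push_cast; omega)]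
    cases j with
    | zero => simp [hP]
    | succ j =>
      have hj' : j < dp.length := by omega
      have h2 : (((j + 1 : Nat) : Int)).toNat = j + 1 := by omega
      simp only [h2]
      show (0 :: pvPsums 0 dp)[j + 1]'(by simp [pvPsums_length]; omega) = _
      rw [List.getElem_cons_succ, pvPsums_getElem dp 0 j hj']
      ring
  -- the new list, as a map
  have hstep : pvBStep f target dp
      = [0] ++ (PySem.List.pyRange 1 (target + 1) 1).map
          (fun s => PySem.List.pyGetD P s 0 - PySem.List.pyGetD P (max 0 (s - f)) 0) := by
    rw [pvBStep]
    rw [pvPref_eq dp [0] 0]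
    exact PySem.List.foldl_append_singleton_eq_map _ _ _
  rw [hstep]
  -- right-hand side split into head and tail
  rw [ht1, List.range_succ_eq_map, List.map_cons, List.map_map]
  have hhead : (0 : Int) = pvWays f (k + 1) ((0 : Nat) : Int) := by
    rw [Nat.cast_zero]
    exact (pvWays_eq_zero f (k + 1) 0 (by push_cast; omega)).symm
  rw [PySem.List.pyRange_one 1 (target + 1)]
  have hcnt : (target + 1 - 1).toNat = target.toNat := by omega
  rw [hcnt, List.map_map, List.singleton_append]
  rw [← hhead]
  congr 1
  apply List.map_congr_left
  intro m hm
  rw [List.mem_range] at hm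
  simp only [Function.comp_def]
  -- now compute the window value at s = 1 + m
  set s : Int := 1 + (m : Int) with hs
  have hs1 : 1 ≤ s := by omega
  have hst : s ≤ target := by omega
  set loZ : Int := max 0 (s - f) with hlo
  have hlo0 : 0 ≤ loZ := le_max_left 0 (s - f)
  have hlos : loZ ≤ s := by omega
  have hcast1 : s = ((m + 1 : Nat) : Int) := by omega
  have hcast2 : loZ = ((loZ.toNat : Nat) : Int) := by omega
  have hga : PySem.List.pyGetD P s 0 = ((PySem.List.pyRange 0 s 1).map (fun i => pvWays f k i)).sum := by
    rw [hcast1]; exact hget (m + 1) (by omega)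
  have hgb : PySem.List.pyGetD P loZ 0 = ((PySem.List.pyRange 0 loZ 1).map (fun i => pvWays f k i)).sum := by
    rw [hcast2]; exact hget loZ.toNat (by omega)
  rw [hga, hgb]
  have hsplit : ((PySem.List.pyRange 0 s 1).map (fun i => pvWays f k i)).sum
      = ((PySem.List.pyRange 0 loZ 1).map (fun i => pvWays f k i)).sum
        + ((PySem.List.pyRange loZ s 1).map (fun i => pvWays f k i)).sum := by
    rw [PySem.List.pyRange_one_append 0 loZ s hlo0 hlos, List.map_append, List.sum_append]
  rw [hsplit]
  have hext : ((PySem.List.pyRange (s - f) s 1).map (fun i => pvWays f k i)).sum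
      = ((PySem.List.pyRange loZ s 1).map (fun i => pvWays f k i)).sum := by
    apply pvSum_extend (fun i => pvWays f k i) (s - f) loZ s s (by omega) (by omega) (by omega)
    intro i hi
    rcases hi with hi | hi
    · exact pvWays_eq_zero f k i (Or.inl (by omega))
    · omega
  have hwin : pvWays f (k + 1) s = ((PySem.List.pyRange (s - f) s 1).map (fun i => pvWays f k i)).sum := by
    show ((PySem.List.pyRange 1 (f + 1) 1).map (fun x => pvWays f k (s - x))).sum = _
    exact pvSum_reindex (fun i => pvWays f k i) f s (by omega)
  have hfin : ((m + 1 : Nat) : Int) = s := hcast1.symm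
  rw [hfin, hwin, hext]
  ring

theorem pvBInv_iter (f target : Int) (hf : 1 ≤ f) (ht : 0 ≤ target) (n : Nat) :
    pvBInv f target n ((pvBStep f target)^[n] ((List.replicate (target + 1).toNat 0).set 0 1)) := by
  induction n with
  | zero => exact pvBInv_zero f target ht
  | succ n ih => rw [Function.iterate_succ_apply']; exact pvBInv_step f target hf ht n _ ih

-- reading entry 'target' off the B-side array
theorem pvRead (f target : Int) (k : Nat) (ht : 0 ≤ target) :
    PySem.List.pyGetD ((List.range (target + 1).toNat).map (fun (s : Nat) => pvWays f k (s : Int))) target 0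
      = pvWays f k target := by
  have h1 : target = ((target.toNat : Nat) : Int) := by omega
  rw [h1, PySem.List.pyGetD_eq_getElem _ 0 (by omega) (by simp)]
  have h2 : (((target.toNat : Nat) : Int)).toNat = target.toNat := by omega
  simp only [h2]
  rw [List.getElem_map, List.getElem_range]

-- ===== VERDICT (by name: the statement is the Claim_ definition above) =====
theorem numRollsToTarget1_spec : Claim_equal_numRollsToTarget1 := by
  intro d f target _hdom
  unfold Spec_numRollsToTarget1 numRollsToTarget1 numRollsToTarget1_alt
  by_cases hg : d ≤ target ∧ target ≤ d * f
  · rw [if_neg (not_not_intro hg), if_neg (not_not_intro hg)]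
    by_cases hd : d ≤ 0
    · rw [if_pos hd]
      simp only []
      rw [pvFoldl_ignore_iterate (pvAStep f), PySem.List.length_pyRange_one]
      have hz : (d - 0).toNat = 0 := by omega
      rw [hz]
      simp only [Function.iterate_zero, id]
      obtain ⟨_, hval, _⟩ := pvAInv_zero f
      rw [hval target]
      by_cases h0 : target = 0
      · rw [if_pos h0, h0]
        show PySem.Int.mod (pvWays f 0 0) 1000000007 = 1
        simp [pvWays]
      · rw [if_neg h0]
        show PySem.Int.mod (pvWays f 0 target) 1000000007 = 0
        simp [pvWays, h0]
    · rw [if_neg hd]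
      have ht : 0 ≤ target := by omega
      simp only []
      rw [pvFoldl_ignore_iterate (pvAStep f), pvFoldl_ignore_iterate (pvBStep f target),
          PySem.List.length_pyRange_one]
      have hd0 : (d - 0).toNat = d.toNat := by omega
      rw [hd0]
      congr 1
      have hf : 1 ≤ f := by
        by_contra hf'
        have h1 : f ≤ 0 := by omega
        have h2 : d * f ≤ 0 := mul_nonpos_of_nonneg_of_nonpos (by omega) h1
        omega
      obtain ⟨_, hval, _⟩ := pvAInv_iter f hf d.toNat
      rw [hval target]
      have hb := pvBInv_iter f target hf ht d.toNat
      unfold pvBInv at hb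
      rw [hb, pvRead f target d.toNat ht]
  · rw [if_pos hg, if_pos hg]
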